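-- pv_equiv track=rewrite | github.com/yoounhk/algorithms-python | src/Programmers/bf1.py | solution
-- ===== SOURCE A (Python) =====
-- def one(n):
--     list = [5, 1, 2, 3, 4]
--     return list[n % 5]
--
-- def two(n):
--     list = [5, 1, 3, 4]
--     if n % 2 == 1:
--         return 2
--     else:
--         return list[(n // 2) % 4]
--
-- def three(n):
--     list = [5, 3, 1, 2, 4]
--     return list[((n + 1) // 2) % 5]
--
-- def solution(answers):  # max length 10000
--     score = [0, 0, 0]
--     for i in range(len(answers)):
--         if answers[i] == one(i + 1):
--             score[0] += 1
--         if answers[i] == two(i + 1):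
--             score[1] += 1
--         if answers[i] == three(i + 1):
--             score[2] += 1
--     maximum = max(score)
--     result = []
--     for i in range(len(score)):
--         if score[i] == maximum:
--             result.append(i + 1)
--     return result
-- ===== SOURCE B (Python) =====
-- def solution(answers):
--     patterns = [[1, 2, 3, 4, 5],
--                 [2, 1, 2, 3, 2, 4, 2, 5],
--                 [3, 3, 1, 1, 2, 2, 4, 4, 5, 5]]
--     scores = []
--     for p in patterns:
--         cnt = {}
--         for i, a in enumerate(answers):
--             k = (i % len(p), a)
--             cnt[k] = cnt.get(k, 0) + 1
--         scores.append(sum(cnt.get((r, p[r]), 0) for r in range(len(p))))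
--     best = max(scores)
--     return [k + 1 for k, s in enumerate(scores) if s == best]
-- ===== Notes on version B (the rewrite author's own statement) =====
-- stated objective: alternative
-- what changed: Instead of comparing every answer against per-index modular formulas and accumulating three scores in one pass, B first aggregates the answers into a histogram dict keyed by (position mod pattern-length, answer) and then reads each pattern's score off that table with one lookup per residue class, so no per-answer pattern comparison happens at scoring time.
import Mathlib
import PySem

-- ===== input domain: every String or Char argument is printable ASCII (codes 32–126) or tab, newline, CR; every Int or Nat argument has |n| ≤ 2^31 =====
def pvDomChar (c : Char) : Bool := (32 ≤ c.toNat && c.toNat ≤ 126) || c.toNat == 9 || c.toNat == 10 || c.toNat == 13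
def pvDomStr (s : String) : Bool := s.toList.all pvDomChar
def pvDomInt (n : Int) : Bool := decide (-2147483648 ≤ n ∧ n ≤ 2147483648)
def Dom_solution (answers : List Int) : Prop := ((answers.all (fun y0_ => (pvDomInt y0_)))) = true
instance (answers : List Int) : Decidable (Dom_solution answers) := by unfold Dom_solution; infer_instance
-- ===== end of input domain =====

-- B replaces A's per-index modular-formula scoring with a residue-class histogram: for each
-- pattern it aggregates answers into a dict keyed by (position mod pattern-length, answer),
-- then reads the score off the table with one lookup per residue; same O(n) cost, alternative structure.


-- ===== PORT A =====
def pyOne (n : Int) : Int := PySem.List.pyGetD ([5, 1, 2, 3, 4] : List Int) (PySem.Int.mod n 5) 0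

def pyTwo (n : Int) : Int :=
  if PySem.Int.mod n 2 == 1 then 2
  else PySem.List.pyGetD ([5, 1, 3, 4] : List Int) (PySem.Int.mod (PySem.Int.floordiv n 2) 4) 0

def pyThree (n : Int) : Int :=
  PySem.List.pyGetD ([5, 3, 1, 2, 4] : List Int) (PySem.Int.mod (PySem.Int.floordiv (n + 1) 2) 5) 0

def solution (answers : List Int) : List Int :=
  let score : Int × Int × Int :=
    (PySem.List.pyRange 0 answers.length 1).foldl
      (fun s i =>
        let a := PySem.List.pyGetD answers i 0
        let s0 := if a == pyOne (i + 1) then s.1 + 1 else s.1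
        let s1 := if a == pyTwo (i + 1) then s.2.1 + 1 else s.2.1
        let s2 := if a == pyThree (i + 1) then s.2.2 + 1 else s.2.2
        (s0, s1, s2)) (0, 0, 0)
  let scoreL : List Int := [score.1, score.2.1, score.2.2]
  let maximum : Int := (PySem.List.max? scoreL (fun y => y)).getD 0
  (PySem.List.pyRange 0 scoreL.length 1).foldl
    (fun r i => if PySem.List.pyGetD scoreL i 0 == maximum then r ++ [i + 1] else r) []

-- ===== PORT B =====
-- Source B: per pattern, one counting pass builds cnt[(i % len(p), a)] += 1, then the score is
-- the sum of len(p) table lookups cnt.get((r, p[r]), 0) — no per-answer pattern comparison.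
def patScoreB (p : List Int) (answers : List Int) : Int :=
  let L : Int := (p.length : Int)
  let cnt : PySem.Dict (Int × Int) Int :=
    (PySem.List.enumerate answers 0).foldl
      (fun d ia =>
        let k := (PySem.Int.mod ia.1 L, ia.2)
        d.insert k (d.getD k 0 + 1)) PySem.Dict.empty
  ((PySem.List.pyRange 0 L 1).map
      (fun r => cnt.getD (r, PySem.List.pyGetD p r 0) 0)).sum

def solution_alt (answers : List Int) : List Int :=
  let patterns : List (List Int) :=
    [[1, 2, 3, 4, 5], [2, 1, 2, 3, 2, 4, 2, 5], [3, 3, 1, 1, 2, 2, 4, 4, 5, 5]]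
  let scores : List Int := patterns.map (fun p => patScoreB p answers)
  let best : Int := (PySem.List.max? scores (fun y => y)).getD 0
  ((PySem.List.enumerate scores 0).filter (fun ks => ks.2 == best)).map (fun ks => ks.1 + 1)

-- ===== PRECONDITION & SPEC =====
def Spec_solution (answers : List Int) (out : List Int) : Prop := out = solution_alt answers
instance (answers : List Int) (out : List Int) : Decidable (Spec_solution answers out) := by unfold Spec_solution; infer_instance

-- ===== CLAIM (what is proved, stated in full; the proofs are below) =====
def Claim_equal_solution : Prop := ∀ (answers : List Int), Dom_solution answers → Spec_solution answers (solution answers)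

-- ===== LEMMAS AND PROOFS =====

-- the three patterns as names for the proofs
def pat1 : List Int := [1, 2, 3, 4, 5]
def pat2 : List Int := [2, 1, 2, 3, 2, 4, 2, 5]
def pat3 : List Int := [3, 3, 1, 1, 2, 2, 4, 4, 5, 5]

-- "element matches the cyclic pattern p at its position" — the common description of a score
def cemPred (p : List Int) (ia : Int × Int) : Bool :=
  ia.2 == PySem.List.pyGetD p (PySem.Int.mod ia.1 (p.length : Int)) 0

def patC (p : List Int) (answers : List Int) : Int :=
  ((PySem.List.enumerate answers 0).countP (cemPred p) : Nat)

theorem mod_toNat (a b : Int) (_ha : 0 <= a) (hb : 0 < b) :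
    PySem.Int.mod a b = (((a % b).toNat : Nat) : Int) := by
  rw [PySem.Int.mod_eq_emod_of_pos hb, Int.toNat_of_nonneg (Int.emod_nonneg a (by omega))]

-- A's helper one(i+1) agrees with the cyclic table pat1 at index i % 5 (i = k a natural)
theorem one_eq_pat (k : Nat) :
    pyOne ((k : Int) + 1) = PySem.List.pyGetD pat1 (PySem.Int.mod (k : Int) 5) 0 := by
  rw [pyOne, mod_toNat ((k : Int) + 1) 5 (by omega) (by norm_num),
    mod_toNat (k : Int) 5 (by omega) (by norm_num),
    PySem.List.pyGetD_natCast, PySem.List.pyGetD_natCast]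
  have h5 : (((k : Int)) % 5).toNat < 5 := by omega
  have e1 : (((k : Int) + 1) % 5).toNat = ((((k : Int)) % 5).toNat + 1) % 5 := by omega
  rw [e1]
  interval_cases h : (((k : Int)) % 5).toNat <;> decide

theorem two_eq_pat (k : Nat) :
    pyTwo ((k : Int) + 1) = PySem.List.pyGetD pat2 (PySem.Int.mod (k : Int) 8) 0 := by
  rw [pyTwo, PySem.Int.mod_eq_emod_of_pos (by norm_num : (0 : Int) < 2),
    PySem.Int.floordiv_eq_ediv_of_pos (by norm_num : (0 : Int) < 2),
    mod_toNat (((k : Int) + 1) / 2) 4 (by omega) (by norm_num),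
    mod_toNat (k : Int) 8 (by omega) (by norm_num),
    PySem.List.pyGetD_natCast, PySem.List.pyGetD_natCast]
  have h8 : (((k : Int)) % 8).toNat < 8 := by omega
  have e1 : ((k : Int) + 1) % 2 = (((((k : Int)) % 8).toNat + 1) % 2 : Nat) := by omega
  have e2 : ((((k : Int) + 1) / 2) % 4).toNat = ((((k : Int)) % 8).toNat + 1) / 2 % 4 := by omega
  rw [e1, e2]
  interval_cases h : (((k : Int)) % 8).toNat <;> decide

theorem three_eq_pat (k : Nat) :
    pyThree ((k : Int) + 1) = PySem.List.pyGetD pat3 (PySem.Int.mod (k : Int) 10) 0 := by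
  rw [pyThree, PySem.Int.floordiv_eq_ediv_of_pos (by norm_num : (0 : Int) < 2),
    mod_toNat (((k : Int) + 1 + 1) / 2) 5 (by omega) (by norm_num),
    mod_toNat (k : Int) 10 (by omega) (by norm_num),
    PySem.List.pyGetD_natCast, PySem.List.pyGetD_natCast]
  have h10 : (((k : Int)) % 10).toNat < 10 := by omega
  have e : ((((k : Int) + 1 + 1) / 2) % 5).toNat = ((((k : Int)) % 10).toNat + 2) / 2 % 5 := by
    omega
  rw [e]
  interval_cases h : (((k : Int)) % 10).toNat <;> decide

-- a triple-accumulator fold of three conditional counters is three countPs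
theorem foldl_triple_count {a : Type} (l : List a) (p q r : a -> Bool) (x y z : Int) :
    l.foldl (fun (s : Int × Int × Int) t =>
        ((if p t then s.1 + 1 else s.1),
         (if q t then s.2.1 + 1 else s.2.1),
         (if r t then s.2.2 + 1 else s.2.2))) (x, y, z)
      = (x + ((l.countP p : Nat) : Int), y + ((l.countP q : Nat) : Int),
         z + ((l.countP r : Nat) : Int)) := by
  induction l generalizing x y z with
  | nil => simp
  | cons c t ih =>
      simp only [List.foldl_cons, List.countP_cons, ih]
      by_cases hp : p c = true <;> by_cases hq : q c = true <;> by_cases hr : r c = true <;>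
        simp [hp, hq, hr, Prod.ext_iff] <;> omega

-- A's score triple equals the three "matches of the cyclic pattern" counts
theorem score_eq (answers : List Int) :
    (PySem.List.pyRange 0 answers.length 1).foldl
      (fun (s : Int × Int × Int) i =>
        let a := PySem.List.pyGetD answers i 0
        let s0 := if a == pyOne (i + 1) then s.1 + 1 else s.1
        let s1 := if a == pyTwo (i + 1) then s.2.1 + 1 else s.2.1
        let s2 := if a == pyThree (i + 1) then s.2.2 + 1 else s.2.2
        (s0, s1, s2)) (0, 0, 0)
      = (patC pat1 answers, patC pat2 answers, patC pat3 answers) := by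
  have hfold :
      (PySem.List.pyRange 0 answers.length 1).foldl
        (fun (s : Int × Int × Int) i =>
          let a := PySem.List.pyGetD answers i 0
          let s0 := if a == pyOne (i + 1) then s.1 + 1 else s.1
          let s1 := if a == pyTwo (i + 1) then s.2.1 + 1 else s.2.1
          let s2 := if a == pyThree (i + 1) then s.2.2 + 1 else s.2.2
          (s0, s1, s2)) (0, 0, 0)
        = (PySem.List.enumerate answers 0).foldl
            (fun (s : Int × Int × Int) ia =>
              ((if ia.2 == pyOne (ia.1 + 1) then s.1 + 1 else s.1),
               (if ia.2 == pyTwo (ia.1 + 1) then s.2.1 + 1 else s.2.1),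
               (if ia.2 == pyThree (ia.1 + 1) then s.2.2 + 1 else s.2.2))) (0, 0, 0) := by
    rw [PySem.List.enumerate_eq_map_pyRange (xs := answers) (d := (0 : Int)), List.foldl_map]
    rfl
  rw [hfold]
  have hcongr :
      (PySem.List.enumerate answers 0).foldl
        (fun (s : Int × Int × Int) ia =>
          ((if ia.2 == pyOne (ia.1 + 1) then s.1 + 1 else s.1),
           (if ia.2 == pyTwo (ia.1 + 1) then s.2.1 + 1 else s.2.1),
           (if ia.2 == pyThree (ia.1 + 1) then s.2.2 + 1 else s.2.2))) (0, 0, 0)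
        = (PySem.List.enumerate answers 0).foldl
            (fun (s : Int × Int × Int) ia =>
              ((if cemPred pat1 ia then s.1 + 1 else s.1),
               (if cemPred pat2 ia then s.2.1 + 1 else s.2.1),
               (if cemPred pat3 ia then s.2.2 + 1 else s.2.2))) (0, 0, 0) := by
    apply PySem.List.foldl_congr_mem
    intro acc ia hmem
    rcases (PySem.List.mem_enumerate_iff _ _ _).1 hmem with ⟨k, hk, hia⟩
    subst hia
    simp only [zero_add, cemPred, pat1, pat2, pat3]
    rw [one_eq_pat, two_eq_pat, three_eq_pat]
    rfl
  rw [hcongr, foldl_triple_count]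
  simp [patC]

-- exactly one residue class matches: a 0/1-sum over range L collapses to the m-th term
theorem sum_range_single (L m : Nat) (hm : m < L) (g : Nat → Int)
    (h0 : ∀ r, r < L → r ≠ m → g r = 0) :
    ((List.range L).map g).sum = g m := by
  induction L with
  | zero => omega
  | succ n ih =>
      rw [List.range_succ, List.map_append, List.sum_append]
      by_cases hmn : m = n
      · subst hmn
        have hz : ((List.range m).map g).sum = 0 := by
          apply List.sum_eq_zero
          intro x hx
          rcases List.mem_map.1 hx with ⟨r, hr, hrx⟩
          have hrn := List.mem_range.1 hr
          rw [← hrx]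
          exact h0 r (by omega) (by omega)
        simp [hz]
      · have hg : g n = 0 := h0 n (by omega) (by omega)
        rw [ih (by omega) (fun r hr hrm => h0 r (by omega) hrm)]
        simp [hg]

-- pointwise: summing the (residue, value)-indicator over all residues tests the cyclic match
theorem indicator_sum (p : List Int) (hp : 0 < p.length) (s : Nat) (a : Int) :
    ((PySem.List.pyRange 0 (p.length : Int) 1).map
        (fun r => if ((PySem.Int.mod (s : Int) (p.length : Int), a)
                       == (r, PySem.List.pyGetD p r 0)) then (1 : Int) else 0)).sum
      = if cemPred p ((s : Int), a) then 1 else 0 := by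
  have hmod : PySem.Int.mod (s : Int) (p.length : Int) = ((s % p.length : Nat) : Int) := by
    rw [mod_toNat _ _ (by omega) (by exact_mod_cast hp)]
    omega
  rw [PySem.List.pyRange_zero_natCast, List.map_map]
  simp only [Function.comp_def]
  rw [sum_range_single p.length (s % p.length) (Nat.mod_lt s hp)
    (g := fun r => if ((PySem.Int.mod (s : Int) (p.length : Int), a)
                       == ((r : Int), PySem.List.pyGetD p (r : Int) 0)) then (1 : Int) else 0)]
  · simp only [cemPred, hmod]
    by_cases h : a = PySem.List.pyGetD p ((s % p.length : Nat) : Int) 0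
    · simp [h]
    · simp [Prod.ext_iff]
  · intro r _ hrm
    rw [if_neg]
    simp only [hmod, beq_iff_eq, Prod.mk.injEq, not_and]
    intro hc
    exact absurd (by exact_mod_cast hc.symm) hrm

-- interchange: the per-residue counts over the keyed list sum to the cyclic-match count
theorem counts_interchange (p : List Int) (hp : 0 < p.length) (xs : List Int) (s : Nat) :
    ((PySem.List.pyRange 0 (p.length : Int) 1).map
        (fun r => (((PySem.List.enumerate xs (s : Int)).countP
            (fun ia => (PySem.Int.mod ia.1 (p.length : Int), ia.2)
                == (r, PySem.List.pyGetD p r 0)) : Nat) : Int))).sum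
      = (((PySem.List.enumerate xs (s : Int)).countP (cemPred p) : Nat) : Int) := by
  induction xs generalizing s with
  | nil => simp [PySem.List.enumerate_nil]
  | cons x t ih =>
      rw [PySem.List.enumerate_cons]
      have hs1 : (s : Int) + 1 = ((s + 1 : Nat) : Int) := by push_cast; ring
      simp only [List.countP_cons]
      have hsplit :
          ((PySem.List.pyRange 0 (p.length : Int) 1).map
              (fun r => (((PySem.List.enumerate t ((s : Int) + 1)).countP
                  (fun ia => (PySem.Int.mod ia.1 (p.length : Int), ia.2)
                      == (r, PySem.List.pyGetD p r 0))
                + (if (PySem.Int.mod ((s : Int)) (p.length : Int), x)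
                      == (r, PySem.List.pyGetD p r 0) then 1 else 0) : Nat) : Int))).sum
            = ((PySem.List.pyRange 0 (p.length : Int) 1).map
                (fun r => (((PySem.List.enumerate t ((s : Int) + 1)).countP
                    (fun ia => (PySem.Int.mod ia.1 (p.length : Int), ia.2)
                        == (r, PySem.List.pyGetD p r 0)) : Nat) : Int))).sum
              + ((PySem.List.pyRange 0 (p.length : Int) 1).map
                  (fun r => if (PySem.Int.mod ((s : Int)) (p.length : Int), x)
                      == (r, PySem.List.pyGetD p r 0) then (1 : Int) else 0)).sum := by
        rw [← PySem.List.sum_map_add_int]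
        congr 1
        refine List.map_congr_left (fun r _ => ?_)
        push_cast
        ring
      rw [hsplit, hs1, ih (s + 1), indicator_sum p hp s x]
      by_cases h : cemPred p ((s : Int), x) = true <;> simp [h]

-- B's table-based score is the cyclic-match count
theorem patScoreB_eq (p : List Int) (hp : 0 < p.length) (answers : List Int) :
    patScoreB p answers = patC p answers := by
  unfold patScoreB
  have hfold :
      (PySem.List.enumerate answers 0).foldl
        (fun (d : PySem.Dict (Int × Int) Int) ia =>
          let k := (PySem.Int.mod ia.1 ((p.length : Nat) : Int), ia.2)
          d.insert k (d.getD k 0 + 1)) PySem.Dict.empty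
        = ((PySem.List.enumerate answers 0).map
            (fun ia => (PySem.Int.mod ia.1 ((p.length : Nat) : Int), ia.2))).foldl
            (fun (d : PySem.Dict (Int × Int) Int) k => d.insert k (d.getD k 0 + 1))
            PySem.Dict.empty := by
    rw [List.foldl_map]
  simp only [hfold]
  have hget : ∀ r : Int,
      (((PySem.List.enumerate answers 0).map
          (fun ia => (PySem.Int.mod ia.1 ((p.length : Nat) : Int), ia.2))).foldl
          (fun (d : PySem.Dict (Int × Int) Int) k => d.insert k (d.getD k 0 + 1))
          PySem.Dict.empty).getD (r, PySem.List.pyGetD p r 0) 0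
        = (((PySem.List.enumerate answers 0).countP
            (fun ia => (PySem.Int.mod ia.1 ((p.length : Nat) : Int), ia.2)
                == (r, PySem.List.pyGetD p r 0)) : Nat) : Int) := by
    intro r
    rw [PySem.Dict.getD_foldl_insert_add_one, PySem.Dict.getD_empty]
    simp [List.count, List.countP_map, Function.comp_def]
  have hmap :
      ((PySem.List.pyRange 0 ((p.length : Nat) : Int) 1).map
          (fun r =>
            (((PySem.List.enumerate answers 0).map
                (fun ia => (PySem.Int.mod ia.1 ((p.length : Nat) : Int), ia.2))).foldl
                (fun (d : PySem.Dict (Int × Int) Int) k => d.insert k (d.getD k 0 + 1))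
                PySem.Dict.empty).getD (r, PySem.List.pyGetD p r 0) 0)).sum
        = ((PySem.List.pyRange 0 ((p.length : Nat) : Int) 1).map
            (fun r => (((PySem.List.enumerate answers 0).countP
                (fun ia => (PySem.Int.mod ia.1 ((p.length : Nat) : Int), ia.2)
                    == (r, PySem.List.pyGetD p r 0)) : Nat) : Int))).sum := by
    congr 1
    exact List.map_congr_left (fun r _ => hget r)
  rw [hmap]
  have hci := counts_interchange p hp answers 0
  simp only [Nat.cast_zero] at hci
  rw [hci]
  simp [patC]

-- ===== VERDICT (by name: the statement is the Claim_ definition above) =====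
theorem solution_spec : Claim_equal_solution := by
  intro answers _
  show solution answers = solution_alt answers
  simp only [solution, solution_alt]
  rw [score_eq]
  set c1 := patC pat1 answers with hc1
  set c2 := patC pat2 answers with hc2
  set c3 := patC pat3 answers with hc3
  have hpats : ([[1, 2, 3, 4, 5], [2, 1, 2, 3, 2, 4, 2, 5], [3, 3, 1, 1, 2, 2, 4, 4, 5, 5]] :
      List (List Int)).map (fun p => patScoreB p answers) = [c1, c2, c3] := by
    simp only [List.map_cons, List.map_nil]
    rw [show ([1, 2, 3, 4, 5] : List Int) = pat1 from rfl,
      show ([2, 1, 2, 3, 2, 4, 2, 5] : List Int) = pat2 from rfl,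
      show ([3, 3, 1, 1, 2, 2, 4, 4, 5, 5] : List Int) = pat3 from rfl,
      patScoreB_eq pat1 (by decide) answers, patScoreB_eq pat2 (by decide) answers,
      patScoreB_eq pat3 (by decide) answers]
  rw [hpats]
  set m := (PySem.List.max? [c1, c2, c3] (fun y => y)).getD 0
  have hr : PySem.List.pyRange 0 (([c1, c2, c3] : List Int).length : Int) 1 = [0, 1, 2] := by
    show PySem.List.pyRange 0 ((3 : Nat) : Int) 1 = [0, 1, 2]
    decide
  rw [hr]
  cases h1 : (c1 == m) <;> cases h2 : (c2 == m) <;> cases h3 : (c3 == m) <;>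
    simp only [beq_iff_eq, beq_eq_false_iff_ne] at h1 h2 h3 <;>
    simp [PySem.List.enumerate, PySem.List.pyGetD, h1, h2, h3]
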